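-- pv_equiv track=rewrite | github.com/f1nniboy/thing | utils/replace.py | _indentation_flexible_replacer
-- ===== SOURCE A (Python) =====
-- from collections.abc import Callable, Generator
--
-- def _indentation_flexible_replacer(
--     content: str, search: str
-- ) -> Generator[str, None, None]:
--     search_lines = search.splitlines()
--     if not search_lines:
--         return
--     n = len(search_lines)
--
--     def strip_min_indent(lines: list[str]) -> list[str]:
--         non_empty = [l for l in lines if l.strip()]
--         if not non_empty:
--             return lines
--         min_indent = min(len(l) - len(l.lstrip()) for l in non_empty)
--         return [l[min_indent:] if l.strip() else l for l in lines]
--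
--     stripped_search = strip_min_indent(search_lines)
--     content_lines = content.splitlines()
--     for i in range(len(content_lines) - n + 1):
--         window = content_lines[i : i + n]
--         if strip_min_indent(window) == stripped_search:
--             yield "\n".join(window)
-- ===== SOURCE B (Python) =====
-- def _indentation_flexible_replacer(content, search):
--     search_lines = search.splitlines()
--     if not search_lines:
--         return
--     n = len(search_lines)
--     # precompute: (original line, indent width, lstripped remainder) for search and content
--     s_info = [(s, len(s) - len(s.lstrip()), s.lstrip()) for s in search_lines]
--     s_min = min((ind for (_s, ind, r) in s_info if r), default=0)
--     content_lines = content.splitlines()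
--     c_info = [(l, len(l) - len(l.lstrip()), l.lstrip()) for l in content_lines]
--     for i in range(len(content_lines) - n + 1):
--         w = c_info[i:i + n]
--         # verify pass 1: whitespace-only search lines verbatim, others by lstripped text
--         if not all((r == sr) if sr else (l == s)
--                    for (l, ind, r), (s, sind, sr) in zip(w, s_info)):
--             continue
--         # verify pass 2: matching relative indentation on non-empty lines
--         w_min = min((ind for (_l, ind, r) in w if r), default=0)
--         if all((not sr) or l[w_min:ind] == s[s_min:sind]
--                for (l, ind, r), (s, sind, sr) in zip(w, s_info)):
--             yield "\n".join(l for (l, _ind, _r) in w)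
-- ===== Notes on version B (the rewrite author's own statement) =====
-- stated objective: alternative
-- what changed: Instead of rebuilding a min-indent-stripped copy of every window (re-running lstrip/strip on each line of each window), B precomputes one (line, indent, lstripped) table for content and search and verifies each window with a two-stage pass: verbatim equality on whitespace-only search lines and lstripped-text equality otherwise, then equal relative indentation (window slice [w_min:indent] vs search slice [s_min:indent]) on the non-empty lines.
import Mathlib
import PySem

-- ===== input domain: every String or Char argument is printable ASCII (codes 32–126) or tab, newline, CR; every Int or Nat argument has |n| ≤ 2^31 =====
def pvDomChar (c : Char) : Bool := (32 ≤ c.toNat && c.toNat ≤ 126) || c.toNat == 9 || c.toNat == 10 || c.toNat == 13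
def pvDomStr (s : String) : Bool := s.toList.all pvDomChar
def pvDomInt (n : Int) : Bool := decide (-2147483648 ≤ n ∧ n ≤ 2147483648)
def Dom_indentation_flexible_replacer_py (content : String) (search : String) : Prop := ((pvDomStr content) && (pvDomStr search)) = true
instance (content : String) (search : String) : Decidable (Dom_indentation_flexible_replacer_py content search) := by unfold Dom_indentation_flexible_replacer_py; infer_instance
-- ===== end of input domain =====

-- B replaces A's per-window list rebuilding (strip_min_indent on every window) by a precomputed
-- (line, indent, lstripped) table and a two-stage verify pass per window; same return values.

-- ===== PORT A =====
-- len(l) - len(l.lstrip())  (the same literal expression appears in both Pythons)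
def pvIndent (l : String) : Int := PySem.Str.len l - PySem.Str.len (PySem.Str.lstrip l)

-- A's inner helper strip_min_indent
def pvStripMinIndent (lines : List String) : List String :=
  let nonEmpty := lines.filter (fun l => PySem.Str.strip l != "")
  if nonEmpty.isEmpty then lines
  else
    let minIndent : Int := (PySem.List.min? (nonEmpty.map pvIndent) (fun x => x)).getD 0
    lines.map (fun l => if PySem.Str.strip l != "" then PySem.Str.slice l (some minIndent) none else l)

def indentation_flexible_replacer_py (content : String) (search : String) : List String :=
  let search_lines := PySem.Str.splitlines search
  if search_lines.isEmpty then []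
  else
    let n : Int := PySem.List.len search_lines
    let stripped_search := pvStripMinIndent search_lines
    let content_lines := PySem.Str.splitlines content
    (PySem.List.pyRange 0 (PySem.List.len content_lines - n + 1) 1).foldl
      (fun acc i =>
        let window := PySem.List.slice content_lines (some i) (some (i + n))
        if pvStripMinIndent window = stripped_search then acc ++ [PySem.Str.join "\n" window]
        else acc) []

-- ===== PORT B =====
-- (original line, indent width, lstripped remainder)
def pvInfo (l : String) : String × Int × String := (l, pvIndent l, PySem.Str.lstrip l)

-- min((ind for (_, ind, r) in ps if r), default=0)
def pvMinIndentInfo (ps : List (String × Int × String)) : Int :=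
  (PySem.List.min? ((ps.filter (fun p => p.2.2 != "")).map (fun p => p.2.1)) (fun x => x)).getD 0

-- verify pass 1: whitespace-only search lines verbatim, others by lstripped text
def pvCheckText (pq : (String × Int × String) × (String × Int × String)) : Bool :=
  if pq.2.2.2 != "" then pq.1.2.2 == pq.2.2.2 else pq.1.1 == pq.2.1

-- verify pass 2: matching relative indentation on non-empty lines
def pvCheckIndent (wmin smin : Int) (pq : (String × Int × String) × (String × Int × String)) : Bool :=
  pq.2.2.2 == "" ||
    PySem.Str.slice pq.1.1 (some wmin) (some pq.1.2.1) == PySem.Str.slice pq.2.1 (some smin) (some pq.2.2.1)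

def indentation_flexible_replacer_py_alt (content : String) (search : String) : List String :=
  let search_lines := PySem.Str.splitlines search
  if search_lines.isEmpty then []
  else
    let n : Int := PySem.List.len search_lines
    let s_info := search_lines.map pvInfo
    let s_min := pvMinIndentInfo s_info
    let content_lines := PySem.Str.splitlines content
    let c_info := content_lines.map pvInfo
    (PySem.List.pyRange 0 (PySem.List.len content_lines - n + 1) 1).foldl
      (fun acc i =>
        let w := PySem.List.slice c_info (some i) (some (i + n))
        if (w.zip s_info).all pvCheckText then
          if (w.zip s_info).all (pvCheckIndent (pvMinIndentInfo w) s_min) then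
            acc ++ [PySem.Str.join "\n" (w.map (fun p => p.1))]
          else acc
        else acc) []

-- ===== PRECONDITION & SPEC =====
def Spec_indentation_flexible_replacer_py (content : String) (search : String) (out : List String) : Prop := out = indentation_flexible_replacer_py_alt content search
instance (content : String) (search : String) (out : List String) : Decidable (Spec_indentation_flexible_replacer_py content search out) := by unfold Spec_indentation_flexible_replacer_py; infer_instance

-- ===== CLAIM (what is proved, stated in full; the proofs are below) =====
def Claim_equal_indentation_flexible_replacer_py : Prop := ∀ (content : String) (search : String), Dom_indentation_flexible_replacer_py content search → Spec_indentation_flexible_replacer_py content search (indentation_flexible_replacer_py content search)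

-- ===== LEMMAS AND PROOFS =====

-- the minimum indent over the lstrip-nonempty lines (default 0)
def pvMinIndOf (L : List String) : Int :=
  (PySem.List.min? ((L.filter (fun l => PySem.Str.lstrip l != "")).map pvIndent) (fun x => x)).getD 0

-- number of leading whitespace characters
def pvK (l : String) : Nat := (l.toList.takeWhile PySem.Chars.isspace).length

theorem pv_toList_empty : ("" : String).toList = [] := rfl

theorem pv_dropWhile_idem (l : List Char) :
    (l.dropWhile PySem.Chars.isspace).dropWhile PySem.Chars.isspace = l.dropWhile PySem.Chars.isspace := by
  induction l with
  | nil => rfl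
  | cons a t ih =>
    by_cases h : PySem.Chars.isspace a = true
    · simpa [h] using ih
    · simp [h]

theorem pv_strip_eq_nil_iff (l : String) : PySem.Str.strip l = "" ↔ PySem.Str.lstrip l = "" := by
  rw [← String.toList_inj, ← String.toList_inj]
  rw [PySem.Str.toList_strip, PySem.Str.toList_lstrip, pv_toList_empty]
  unfold PySem.Chars.strip PySem.Chars.rstrip
  constructor
  · intro h
    have h1 : List.dropWhile PySem.Chars.isspace (PySem.Chars.lstrip l.toList).reverse = [] := by
      simpa [List.reverse_eq_nil_iff] using h
    have h2 : ∀ x ∈ PySem.Chars.lstrip l.toList, PySem.Chars.isspace x = true := by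
      intro x hx
      exact List.dropWhile_eq_nil_iff.1 h1 x (List.mem_reverse.2 hx)
    have h3 : List.dropWhile PySem.Chars.isspace (PySem.Chars.lstrip l.toList) = PySem.Chars.lstrip l.toList :=
      pv_dropWhile_idem l.toList
    exact h3.symm.trans (List.dropWhile_eq_nil_iff.2 h2)
  · intro h
    rw [h]
    rfl

theorem pv_strip_ne_iff (l : String) :
    (PySem.Str.strip l != "") = (PySem.Str.lstrip l != "") := by
  rw [Bool.eq_iff_iff]
  simp only [bne_iff_ne, ne_eq, not_iff_not]
  exact pv_strip_eq_nil_iff l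

theorem pvIndent_eq (l : String) : pvIndent l = (pvK l : Int) := by
  have h : (l.toList.takeWhile PySem.Chars.isspace).length
      + (l.toList.dropWhile PySem.Chars.isspace).length = l.toList.length := by
    rw [← List.length_append, List.takeWhile_append_dropWhile]
  simp only [pvIndent, PySem.Str.len_eq, PySem.Str.toList_lstrip, PySem.Chars.lstrip, pvK]
  omega

theorem pvIndent_nonneg (l : String) : 0 ≤ pvIndent l := by
  rw [pvIndent_eq]; exact Int.natCast_nonneg _

theorem pv_drop_decomp (cs : List Char) (m : Nat)
    (hm : m ≤ (cs.takeWhile PySem.Chars.isspace).length) :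
    cs.drop m = (cs.takeWhile PySem.Chars.isspace).drop m ++ cs.dropWhile PySem.Chars.isspace := by
  conv_lhs => rw [← List.takeWhile_append_dropWhile (p := PySem.Chars.isspace) (l := cs)]
  rw [List.drop_append_of_le_length hm]

theorem pv_lstrip_drop (cs : List Char) (m : Nat)
    (hm : m ≤ (cs.takeWhile PySem.Chars.isspace).length) :
    (cs.drop m).dropWhile PySem.Chars.isspace = cs.dropWhile PySem.Chars.isspace := by
  rw [pv_drop_decomp cs m hm, List.dropWhile_append]
  have h1 : ((cs.takeWhile PySem.Chars.isspace).drop m).dropWhile PySem.Chars.isspace = [] := by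
    rw [List.dropWhile_eq_nil_iff]
    intro x hx
    exact List.mem_takeWhile_imp (List.mem_of_mem_drop hx)
  simp [h1, pv_dropWhile_idem]

theorem pv_slice_from_toList (l : String) (m : Int) (h0 : 0 ≤ m) :
    (PySem.Str.slice l (some m) none).toList = l.toList.drop m.toNat := by
  rw [PySem.Str.toList_slice, PySem.Chars.slice_eq_listSlice, PySem.List.slice_from _ h0]

theorem pv_slice_chunk_toList (l : String) (m : Int) (h0 : 0 ≤ m) (hk : m.toNat ≤ pvK l) :
    (PySem.Str.slice l (some m) (some (pvIndent l))).toList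
      = (l.toList.takeWhile PySem.Chars.isspace).drop m.toNat := by
  rw [PySem.Str.toList_slice, PySem.Chars.slice_eq_listSlice,
    PySem.List.slice_toNat _ h0 (pvIndent_nonneg l)]
  have hknat : (pvIndent l).toNat = pvK l := by rw [pvIndent_eq]; exact Int.toNat_natCast _
  rw [hknat]
  have hKdef : (l.toList.takeWhile PySem.Chars.isspace).length = pvK l := rfl
  rw [pv_drop_decomp l.toList m.toNat (by omega)]
  have hlen : ((l.toList.takeWhile PySem.Chars.isspace).drop m.toNat).length = pvK l - m.toNat := by
    rw [List.length_drop, hKdef]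
  rw [List.take_append_of_le_length (by omega), List.take_of_length_le (by omega)]

theorem pv_lstrip_slice (l : String) (m : Int) (h0 : 0 ≤ m) (hk : m.toNat ≤ pvK l) :
    PySem.Str.lstrip (PySem.Str.slice l (some m) none) = PySem.Str.lstrip l := by
  rw [← String.toList_inj]
  rw [PySem.Str.toList_lstrip, PySem.Str.toList_lstrip, pv_slice_from_toList l m h0]
  exact pv_lstrip_drop l.toList m.toNat hk

theorem pv_drop_eq_iff (cs ds : List Char) (a b : Nat)
    (ha : a ≤ (cs.takeWhile PySem.Chars.isspace).length)
    (hb : b ≤ (ds.takeWhile PySem.Chars.isspace).length) :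
    cs.drop a = ds.drop b
    ↔ (cs.dropWhile PySem.Chars.isspace = ds.dropWhile PySem.Chars.isspace ∧
       (cs.takeWhile PySem.Chars.isspace).drop a = (ds.takeWhile PySem.Chars.isspace).drop b) := by
  constructor
  · intro h
    have h1 : cs.dropWhile PySem.Chars.isspace = ds.dropWhile PySem.Chars.isspace := by
      rw [← pv_lstrip_drop cs a ha, ← pv_lstrip_drop ds b hb, h]
    refine ⟨h1, ?_⟩
    rw [pv_drop_decomp cs a ha, pv_drop_decomp ds b hb, h1] at h
    exact List.append_cancel_right h
  · rintro ⟨h1, h2⟩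
    rw [pv_drop_decomp cs a ha, pv_drop_decomp ds b hb, h1, h2]

theorem pv_pair_iff (x y : String) (mw ms : Int) (h0x : 0 ≤ mw) (h0y : 0 ≤ ms)
    (hkx : mw.toNat ≤ pvK x) (hky : ms.toNat ≤ pvK y) :
    PySem.Str.slice x (some mw) none = PySem.Str.slice y (some ms) none
    ↔ (PySem.Str.lstrip x = PySem.Str.lstrip y ∧
       PySem.Str.slice x (some mw) (some (pvIndent x)) = PySem.Str.slice y (some ms) (some (pvIndent y))) := by
  rw [← String.toList_inj (s₁ := PySem.Str.slice x (some mw) none),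
      ← String.toList_inj (s₁ := PySem.Str.lstrip x),
      ← String.toList_inj (s₁ := PySem.Str.slice x (some mw) (some (pvIndent x)))]
  rw [pv_slice_from_toList x mw h0x, pv_slice_from_toList y ms h0y,
      PySem.Str.toList_lstrip, PySem.Str.toList_lstrip,
      pv_slice_chunk_toList x mw h0x hkx, pv_slice_chunk_toList y ms h0y hky]
  exact pv_drop_eq_iff x.toList y.toList mw.toNat ms.toNat hkx hky

theorem pvMinIndOf_spec (L : List String)
    (h : L.filter (fun l => PySem.Str.lstrip l != "") ≠ []) :
    0 ≤ pvMinIndOf L ∧ ∀ l ∈ L, PySem.Str.lstrip l ≠ "" → pvMinIndOf L ≤ pvIndent l := by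
  unfold pvMinIndOf
  cases hmin : PySem.List.min?
      ((L.filter (fun l => PySem.Str.lstrip l != "")).map pvIndent) (fun x => x) with
  | none =>
    exact absurd (List.map_eq_nil_iff.1 ((PySem.List.min?_eq_none_iff _ _).1 hmin)) h
  | some m =>
    have hmem := PySem.List.min?_mem hmin
    have hmin' := PySem.List.min?_isMin hmin
    simp only [Option.getD_some]
    constructor
    · obtain ⟨l0, _, hl0⟩ := List.mem_map.1 hmem
      rw [← hl0]; exact pvIndent_nonneg l0
    · intro l hl hlne
      have hmemL : pvIndent l ∈ (L.filter (fun l => PySem.Str.lstrip l != "")).map pvIndent :=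
        List.mem_map_of_mem (List.mem_filter.2 ⟨hl, by simpa [bne_iff_ne] using hlne⟩)
      simpa using hmin' _ hmemL

theorem pvMin_le_K (L : List String) (l : String)
    (h : L.filter (fun l => PySem.Str.lstrip l != "") ≠ [])
    (hl : l ∈ L) (hlne : PySem.Str.lstrip l ≠ "") :
    (pvMinIndOf L).toNat ≤ pvK l := by
  obtain ⟨h0, hmin⟩ := pvMinIndOf_spec L h
  have h1 := hmin l hl hlne
  have h2 := pvIndent_eq l
  omega

theorem pv_ws_ne_slice (l x : String) (m : Int) (h0 : 0 ≤ m) (hk : m.toNat ≤ pvK x)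
    (hws : PySem.Str.lstrip l = "") (hx : PySem.Str.lstrip x ≠ "") :
    PySem.Str.slice x (some m) none ≠ l := by
  intro h
  have h1 := pv_lstrip_slice x m h0 hk
  rw [h] at h1
  exact hx (by rw [← h1, hws])

theorem pv_filter_info (L : List String) :
    (L.map pvInfo).filter (fun p => p.2.2 != "") = (L.filter (fun l => PySem.Str.lstrip l != "")).map pvInfo := by
  rw [List.filter_map]
  rfl

theorem pv_minInfo_eq (L : List String) : pvMinIndentInfo (L.map pvInfo) = pvMinIndOf L := by
  unfold pvMinIndentInfo pvMinIndOf
  rw [pv_filter_info, List.map_map]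
  rfl

theorem pv_all_zip_iff {α β : Type} (xs : List α) (ys : List β) (h : xs.length = ys.length)
    (p : α × β → Bool) :
    ((xs.zip ys).all p = true)
      ↔ ∀ (j : Nat) (hx : j < xs.length) (hy : j < ys.length), p (xs[j], ys[j]) = true := by
  rw [List.all_eq_true]
  constructor
  · intro hall j hx hy
    have hj : j < (xs.zip ys).length := by
      rw [List.length_zip]; omega
    have hmem : (xs[j], ys[j]) ∈ xs.zip ys := by
      have h1 : (xs.zip ys)[j] ∈ xs.zip ys := List.getElem_mem hj
      simpa [List.getElem_zip] using h1
    exact hall _ hmem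
  · intro hpt x hx
    obtain ⟨j, hj, rfl⟩ := List.mem_iff_getElem.1 hx
    have hjx : j < xs.length := by rw [List.length_zip] at hj; omega
    have hjy : j < ys.length := by rw [List.length_zip] at hj; omega
    simpa [List.getElem_zip] using hpt j hjx hjy

theorem pv_checkText_iff (w s : String) :
    pvCheckText (pvInfo w, pvInfo s) = true
      ↔ (PySem.Str.lstrip w = PySem.Str.lstrip s ∧ (PySem.Str.lstrip s = "" → w = s)) := by
  unfold pvCheckText pvInfo
  by_cases h : PySem.Str.lstrip s = ""
  · simp only [h, bne_self_eq_false, Bool.false_eq_true, if_false, beq_iff_eq]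
    constructor
    · intro he
      subst he
      exact ⟨h, fun _ => rfl⟩
    · intro hh
      exact hh.2 (by trivial)
  · simp [bne_iff_ne, h, beq_iff_eq]

theorem pv_checkIndent_iff (mW mS : Int) (w s : String) :
    pvCheckIndent mW mS (pvInfo w, pvInfo s) = true
      ↔ (PySem.Str.lstrip s = "" ∨
         PySem.Str.slice w (some mW) (some (pvIndent w)) = PySem.Str.slice s (some mS) (some (pvIndent s))) := by
  unfold pvCheckIndent pvInfo
  simp [beq_iff_eq]

theorem pv_map_eq_iff {α β : Type} (f g : α → β) (W S : List α) (hlen : W.length = S.length) :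
    W.map f = S.map g ↔ ∀ (j : Nat) (h1 : j < W.length) (h2 : j < S.length), f W[j] = g S[j] := by
  constructor
  · intro h j h1 h2
    have hb : j < (W.map f).length := by simpa using h1
    have := List.getElem_of_eq h hb
    simpa [List.getElem_map] using this
  · intro h
    apply List.ext_getElem (by simp [hlen])
    intro j h1 h2
    simp only [List.getElem_map]
    exact h j (by simpa using h1) (by simpa using h2)

theorem pv_stripMin_nil (L : List String)
    (h : L.filter (fun l => PySem.Str.lstrip l != "") = []) :
    pvStripMinIndent L = L := by
  have hfe : (fun l => PySem.Str.strip l != "") = (fun l => PySem.Str.lstrip l != "") :=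
    funext (fun l => pv_strip_ne_iff l)
  simp only [pvStripMinIndent, hfe, h]
  rfl

theorem pv_stripMin_cons (L : List String)
    (h : L.filter (fun l => PySem.Str.lstrip l != "") ≠ []) :
    pvStripMinIndent L
      = L.map (fun l => if PySem.Str.lstrip l != "" then PySem.Str.slice l (some (pvMinIndOf L)) none else l) := by
  have hfe : (fun l => PySem.Str.strip l != "") = (fun l => PySem.Str.lstrip l != "") :=
    funext (fun l => pv_strip_ne_iff l)
  have hne : (L.filter (fun l => PySem.Str.lstrip l != "")).isEmpty = false := by
    cases hL : L.filter (fun l => PySem.Str.lstrip l != "") with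
    | nil => exact absurd hL h
    | cons a t => rfl
  simp only [pvStripMinIndent, hfe, hne, Bool.false_eq_true, if_false]
  refine List.map_congr_left (fun l _ => ?_)
  rw [pv_strip_ne_iff]
  rfl

-- the pointwise reading of B's two verify passes
theorem pv_rhs_iff (S W : List String) (hlen : W.length = S.length) :
    (((W.map pvInfo).zip (S.map pvInfo)).all pvCheckText = true ∧
     ((W.map pvInfo).zip (S.map pvInfo)).all
       (pvCheckIndent (pvMinIndentInfo (W.map pvInfo)) (pvMinIndentInfo (S.map pvInfo))) = true)
    ↔ ((∀ (j : Nat) (h1 : j < W.length) (h2 : j < S.length),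
          PySem.Str.lstrip W[j] = PySem.Str.lstrip S[j] ∧ (PySem.Str.lstrip S[j] = "" → W[j] = S[j])) ∧
       (∀ (j : Nat) (h1 : j < W.length) (h2 : j < S.length),
          PySem.Str.lstrip S[j] = "" ∨
            PySem.Str.slice W[j] (some (pvMinIndOf W)) (some (pvIndent W[j]))
              = PySem.Str.slice S[j] (some (pvMinIndOf S)) (some (pvIndent S[j])))) := by
  rw [pv_minInfo_eq, pv_minInfo_eq,
      pv_all_zip_iff _ _ (by simp [hlen]) _, pv_all_zip_iff _ _ (by simp [hlen]) _]
  simp only [List.length_map, List.getElem_map]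
  exact and_congr
    (forall_congr' fun j => forall_congr' fun h1 => forall_congr' fun h2 => pv_checkText_iff _ _)
    (forall_congr' fun j => forall_congr' fun h1 => forall_congr' fun h2 => pv_checkIndent_iff _ _ _ _)

-- the core per-window equivalence
theorem pv_core (S W : List String) (hlen : W.length = S.length) :
    (pvStripMinIndent W = pvStripMinIndent S)
    ↔ (((W.map pvInfo).zip (S.map pvInfo)).all pvCheckText = true ∧
       ((W.map pvInfo).zip (S.map pvInfo)).all
         (pvCheckIndent (pvMinIndentInfo (W.map pvInfo)) (pvMinIndentInfo (S.map pvInfo))) = true) := by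
  rw [pv_rhs_iff S W hlen]
  by_cases hSf : S.filter (fun l => PySem.Str.lstrip l != "") = []
  · have hSws : ∀ s ∈ S, PySem.Str.lstrip s = "" := by
      intro s hs
      have := List.filter_eq_nil_iff.1 hSf s hs
      simpa [bne_iff_ne] using this
    by_cases hWf : W.filter (fun l => PySem.Str.lstrip l != "") = []
    · rw [pv_stripMin_nil W hWf, pv_stripMin_nil S hSf]
      constructor
      · rintro rfl
        refine ⟨fun j h1 h2 => ⟨rfl, fun _ => rfl⟩, fun j h1 h2 => Or.inl ?_⟩
        exact hSws _ (List.getElem_mem h2)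
      · rintro ⟨h1, _⟩
        apply List.ext_getElem hlen
        intro j hj1 hj2
        exact (h1 j hj1 hj2).2 (hSws _ (List.getElem_mem hj2))
    · -- W has a non-whitespace line while S is all whitespace: both sides fail
      have hWws : ∃ j : Nat, ∃ h : j < W.length, PySem.Str.lstrip W[j] ≠ "" := by
        obtain ⟨x, hx⟩ := List.exists_mem_of_ne_nil _ hWf
        obtain ⟨hxW, hxne⟩ := List.mem_filter.1 hx
        obtain ⟨j, hj, hjx⟩ := List.mem_iff_getElem.1 hxW
        exact ⟨j, hj, by rw [hjx]; simpa [bne_iff_ne] using hxne⟩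
      obtain ⟨j0, hj0, hj0ne⟩ := hWws
      have hj0S : j0 < S.length := hlen ▸ hj0
      constructor
      · intro hAB
        exfalso
        rw [pv_stripMin_nil S hSf, pv_stripMin_cons W hWf] at hAB
        have hpt := (pv_map_eq_iff _ id W S hlen).1 (by simpa using hAB) j0 hj0 hj0S
        simp only [hj0ne, id] at hpt
        exact pv_ws_ne_slice S[j0] W[j0] (pvMinIndOf W) (pvMinIndOf_spec W hWf).1
          (pvMin_le_K W W[j0] hWf (List.getElem_mem hj0) hj0ne)
          (hSws _ (List.getElem_mem hj0S)) hj0ne hpt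
      · rintro ⟨h1, _⟩
        exfalso
        exact hj0ne (((h1 j0 hj0 hj0S).1).trans (hSws _ (List.getElem_mem hj0S)))
  · have hSex : ∃ j : Nat, ∃ h : j < S.length, PySem.Str.lstrip S[j] ≠ "" := by
      obtain ⟨x, hx⟩ := List.exists_mem_of_ne_nil _ hSf
      obtain ⟨hxS, hxne⟩ := List.mem_filter.1 hx
      obtain ⟨j, hj, hjx⟩ := List.mem_iff_getElem.1 hxS
      exact ⟨j, hj, by rw [hjx]; simpa [bne_iff_ne] using hxne⟩
    obtain ⟨j0, hj0S, hj0ne⟩ := hSex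
    have hj0W : j0 < W.length := hlen ▸ hj0S
    by_cases hWf : W.filter (fun l => PySem.Str.lstrip l != "") = []
    · -- S has a non-whitespace line while W is all whitespace: both sides fail
      have hWws : ∀ w ∈ W, PySem.Str.lstrip w = "" := by
        intro w hw
        have := List.filter_eq_nil_iff.1 hWf w hw
        simpa [bne_iff_ne] using this
      constructor
      · intro hAB
        exfalso
        rw [pv_stripMin_nil W hWf, pv_stripMin_cons S hSf] at hAB
        have hpt := (pv_map_eq_iff id _ W S hlen).1 (by simpa using hAB) j0 hj0W hj0S
        simp only [hj0ne, id] at hpt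
        exact pv_ws_ne_slice W[j0] S[j0] (pvMinIndOf S) (pvMinIndOf_spec S hSf).1
          (pvMin_le_K S S[j0] hSf (List.getElem_mem hj0S) hj0ne)
          (hWws _ (List.getElem_mem hj0W)) hj0ne hpt.symm
      · rintro ⟨h1, _⟩
        exfalso
        exact hj0ne ((h1 j0 hj0W hj0S).1.symm.trans (hWws _ (List.getElem_mem hj0W)))
    · -- both have non-whitespace lines
      have hWspec := pvMinIndOf_spec W hWf
      have hSspec := pvMinIndOf_spec S hSf
      rw [pv_stripMin_cons W hWf, pv_stripMin_cons S hSf, pv_map_eq_iff _ _ W S hlen]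
      constructor
      · intro hpt
        have key : ∀ (j : Nat) (h1 : j < W.length) (h2 : j < S.length),
            (PySem.Str.lstrip W[j] = PySem.Str.lstrip S[j] ∧ (PySem.Str.lstrip S[j] = "" → W[j] = S[j])) ∧
            (PySem.Str.lstrip S[j] = "" ∨
              PySem.Str.slice W[j] (some (pvMinIndOf W)) (some (pvIndent W[j]))
                = PySem.Str.slice S[j] (some (pvMinIndOf S)) (some (pvIndent S[j]))) := by
          intro j h1 h2
          have hj := hpt j h1 h2
          by_cases hsw : PySem.Str.lstrip S[j] = ""
          · by_cases hww : PySem.Str.lstrip W[j] = ""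
            · simp only [hsw, hww, bne_self_eq_false, Bool.false_eq_true, if_false] at hj
              exact ⟨⟨hww.trans hsw.symm, fun _ => hj⟩, Or.inl hsw⟩
            · exfalso
              simp only [hsw, bne_self_eq_false, Bool.false_eq_true, if_false,
                (by simpa [bne_iff_ne] using hww : (PySem.Str.lstrip W[j] != "") = true), if_true] at hj
              exact pv_ws_ne_slice S[j] W[j] (pvMinIndOf W) hWspec.1
                (pvMin_le_K W W[j] hWf (List.getElem_mem h1) hww) hsw hww hj
          · by_cases hww : PySem.Str.lstrip W[j] = ""
            · exfalso
              simp only [hww, bne_self_eq_false, Bool.false_eq_true, if_false,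
                (by simpa [bne_iff_ne] using hsw : (PySem.Str.lstrip S[j] != "") = true), if_true] at hj
              exact pv_ws_ne_slice W[j] S[j] (pvMinIndOf S) hSspec.1
                (pvMin_le_K S S[j] hSf (List.getElem_mem h2) hsw) hww hsw hj.symm
            · simp only [(by simpa [bne_iff_ne] using hww : (PySem.Str.lstrip W[j] != "") = true),
                (by simpa [bne_iff_ne] using hsw : (PySem.Str.lstrip S[j] != "") = true), if_true] at hj
              have hiff := (pv_pair_iff W[j] S[j] (pvMinIndOf W) (pvMinIndOf S) hWspec.1 hSspec.1
                (pvMin_le_K W W[j] hWf (List.getElem_mem h1) hww)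
                (pvMin_le_K S S[j] hSf (List.getElem_mem h2) hsw)).1 hj
              exact ⟨⟨hiff.1, fun h => absurd h hsw⟩, Or.inr hiff.2⟩
        exact ⟨fun j h1 h2 => (key j h1 h2).1, fun j h1 h2 => (key j h1 h2).2⟩
      · rintro ⟨h1, h2⟩ j hj1 hj2
        by_cases hsw : PySem.Str.lstrip S[j] = ""
        · have hww : PySem.Str.lstrip W[j] = "" := ((h1 j hj1 hj2).1).trans hsw
          simp only [hsw, hww, bne_self_eq_false, Bool.false_eq_true, if_false]
          exact (h1 j hj1 hj2).2 hsw
        · have hww : PySem.Str.lstrip W[j] ≠ "" := by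
            rw [(h1 j hj1 hj2).1]; exact hsw
          have hchunk : PySem.Str.slice W[j] (some (pvMinIndOf W)) (some (pvIndent W[j]))
              = PySem.Str.slice S[j] (some (pvMinIndOf S)) (some (pvIndent S[j])) := by
            rcases h2 j hj1 hj2 with h | h
            · exact absurd h hsw
            · exact h
          simp only [(by simpa [bne_iff_ne] using hww : (PySem.Str.lstrip W[j] != "") = true),
            (by simpa [bne_iff_ne] using hsw : (PySem.Str.lstrip S[j] != "") = true), if_true]
          exact (pv_pair_iff W[j] S[j] (pvMinIndOf W) (pvMinIndOf S) hWspec.1 hSspec.1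
            (pvMin_le_K W W[j] hWf (List.getElem_mem hj1) hww)
            (pvMin_le_K S S[j] hSf (List.getElem_mem hj2) hsw)).2 ⟨(h1 j hj1 hj2).1, hchunk⟩

theorem pv_main (content search : String) :
    indentation_flexible_replacer_py content search = indentation_flexible_replacer_py_alt content search := by
  unfold indentation_flexible_replacer_py indentation_flexible_replacer_py_alt
  by_cases hS : (PySem.Str.splitlines search).isEmpty
  · simp only [hS, if_true]
  · simp only [hS, Bool.false_eq_true, if_false]
    apply PySem.List.foldl_congr_mem
    intro acc i hi
    obtain ⟨hi0, hiub⟩ := PySem.List.mem_pyRange_one.1 hi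
    set S := PySem.Str.splitlines search with hSdef
    set C := PySem.Str.splitlines content with hCdef
    have hiub' : i < (C.length : Int) - (S.length : Int) + 1 := by
      simpa [PySem.List.len_eq] using hiub
    have hle : i.toNat + S.length ≤ C.length := by omega
    have hnat : (i + PySem.List.len S).toNat - i.toNat = S.length := by
      simp only [PySem.List.len_eq]; omega
    have hW : PySem.List.slice C (some i) (some (i + PySem.List.len S))
        = (C.drop i.toNat).take S.length := by
      rw [PySem.List.slice_toNat _ hi0 (by simp [PySem.List.len_eq]; omega), hnat]
    have hWinfo : PySem.List.slice (C.map pvInfo) (some i) (some (i + PySem.List.len S))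
        = ((C.drop i.toNat).take S.length).map pvInfo := by
      rw [PySem.List.slice_toNat _ hi0 (by simp [PySem.List.len_eq]; omega), hnat,
        ← List.map_drop, ← List.map_take]
    rw [hW, hWinfo]
    set W := (C.drop i.toNat).take S.length with hWdef
    have hWlen : W.length = S.length := by
      rw [hWdef, List.length_take, List.length_drop]; omega
    have hfst : (W.map pvInfo).map (fun p => p.1) = W := by
      rw [List.map_map]; exact List.map_id W
    have hcore := pv_core S W hWlen
    by_cases hc : pvStripMinIndent W = pvStripMinIndent S
    · obtain ⟨h1, h2⟩ := hcore.1 hc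
      rw [if_pos hc, if_pos h1, if_pos h2, hfst]
    · rw [if_neg hc]
      by_cases ha : ((W.map pvInfo).zip (S.map pvInfo)).all pvCheckText = true
      · have hb : ¬ ((W.map pvInfo).zip (S.map pvInfo)).all
            (pvCheckIndent (pvMinIndentInfo (W.map pvInfo)) (pvMinIndentInfo (S.map pvInfo))) = true :=
          fun hb => hc (hcore.2 ⟨ha, hb⟩)
        rw [if_pos ha, if_neg hb]
      · rw [if_neg ha]

-- ===== VERDICT (by name: the statement is the Claim_ definition above) =====
theorem indentation_flexible_replacer_py_spec : Claim_equal_indentation_flexible_replacer_py := by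
  intro content search _
  unfold Spec_indentation_flexible_replacer_py
  exact pv_main content search
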